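-- pv_equiv track=rewrite | github.com/Cheolhui-j/Algorithm | chap7/chap7_6.py | subFrom
-- ===== SOURCE A (Python) =====
-- def subFrom(a, b):
--     if len(a) < len(b):
--         return subFrom(b, a)
--     for i in range(len(b)):
--         if a[i] < b[i]:
--             a[i] = (a[i] + 10) - b[i]
--             a[i+1] = a[i+1] - 1
--         else:
--             a[i] = a[i] - b[i]
--     return a
-- ===== SOURCE B (Python) =====
-- # Same digit-wise subtraction, but without mutating the inputs: a deferred
-- # borrow flag over zip(a, b) builds a fresh result list (A mutates `a` in
-- # place; the equivalence is about the return value).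
-- def subFrom(a, b):
--     if len(a) < len(b):
--         return subFrom(b, a)
--     out = []
--     borrow = 0
--     for x, y in zip(a, b):
--         d = x - y - borrow
--         if d < 0:
--             out.append(d + 10)
--             borrow = 1
--         else:
--             out.append(d)
--             borrow = 0
--     if borrow == 1:
--         return out + [a[len(b)] - 1] + a[len(b) + 1:]
--     return out + a[len(b):]
-- ===== Notes on version B (the rewrite author's own statement) =====
-- stated objective: simpler
-- what changed: Replaces A's in-place index loop that writes the borrow eagerly into a[i+1] (mutating the input) with a deferred borrow flag carried over zip(a,b) that builds a fresh output list, splicing in the borrow-decremented higher digit and the untouched tail at the end.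
import Mathlib
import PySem

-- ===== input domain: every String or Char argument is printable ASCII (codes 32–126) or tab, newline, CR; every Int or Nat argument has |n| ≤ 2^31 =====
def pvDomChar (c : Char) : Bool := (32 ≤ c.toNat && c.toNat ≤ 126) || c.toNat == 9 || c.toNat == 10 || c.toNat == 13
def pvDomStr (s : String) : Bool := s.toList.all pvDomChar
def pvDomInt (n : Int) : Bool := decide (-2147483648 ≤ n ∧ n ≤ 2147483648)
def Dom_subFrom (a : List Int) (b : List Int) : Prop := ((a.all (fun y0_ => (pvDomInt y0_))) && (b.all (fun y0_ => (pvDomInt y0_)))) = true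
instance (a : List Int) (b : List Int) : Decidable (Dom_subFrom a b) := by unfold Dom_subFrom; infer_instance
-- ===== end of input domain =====

-- B replaces A's in-place index loop (which writes the borrow eagerly into a[i+1]) by a
-- deferred borrow flag over zip(a,b) building a fresh list; A mutates its argument `a`
-- in place, B does not — the equivalence proved here is about the return value.

-- ===== PORT A =====
-- the `for i in range(len(b))` loop mutating list a; where Python's a[i+1] assignment
-- would raise IndexError (excluded by Pre_) List.set is a no-op
def subFromLoop (a : List Int) (b : List Int) (i : Nat) : List Int :=
  if i < b.length then
    let ai := a.getD i 0
    let bi := b.getD i 0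
    if ai < bi then
      let a1 := a.set i (ai + 10 - bi)
      subFromLoop (a1.set (i + 1) (a1.getD (i + 1) 0 - 1)) b (i + 1)
    else
      subFromLoop (a.set i (ai - bi)) b (i + 1)
  else a
termination_by b.length - i
decreasing_by all_goals omega

def subFrom (a : List Int) (b : List Int) : List Int :=
  if a.length < b.length then subFrom b a
  else subFromLoop a b 0
termination_by (if a.length < b.length then 1 else 0)
decreasing_by
  rename_i h
  rw [if_pos h, if_neg (by omega)]
  omega

-- ===== PORT B =====
def subFrom_alt (a : List Int) (b : List Int) : List Int :=
  if a.length < b.length then subFrom_alt b a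
  else
    let st := (a.zip b).foldl
      (fun (st : List Int × Int) (xy : Int × Int) =>
        let d := xy.1 - xy.2 - st.2
        if d < 0 then (st.1 ++ [d + 10], 1) else (st.1 ++ [d], 0))
      ([], 0)
    if st.2 == 1 then st.1 ++ [a.getD b.length 0 - 1] ++ a.drop (b.length + 1)
    else st.1 ++ a.drop b.length
termination_by (if a.length < b.length then 1 else 0)
decreasing_by
  rename_i h
  rw [if_pos h, if_neg (by omega)]
  omega

-- ===== PRECONDITION & SPEC =====
-- the final borrow of the digit-wise subtraction (a scan over the zipped digit pairs;
-- it has no closed form in the digits' values alone)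
def pvBorrowEnd (br : Int) : List (Int × Int) → Int
  | [] => br
  | (x, y) :: t => pvBorrowEnd (if x - y - br < 0 then 1 else 0) t

-- Pre_ excludes exactly the inputs where A raises IndexError (so B does too):
-- equal-length lists whose subtraction ends with a pending borrow, making A index a[len(b)].
def Pre_subFrom (a : List Int) (b : List Int) : Prop :=
  a.length = b.length → pvBorrowEnd 0 (a.zip b) = 0
instance (a : List Int) (b : List Int) : Decidable (Pre_subFrom a b) := by
  unfold Pre_subFrom; infer_instance

def pvWitness_subFrom : List Int × List Int := ([5, 3], [7])

def Spec_subFrom (a : List Int) (b : List Int) (out : List Int) : Prop := out = subFrom_alt a b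
instance (a : List Int) (b : List Int) (out : List Int) : Decidable (Spec_subFrom a b out) := by unfold Spec_subFrom; infer_instance

-- ===== CLAIM (what is proved, stated in full; the proofs are below) =====
def Claim_equal_subFrom : Prop := ∀ (a : List Int) (b : List Int), Dom_subFrom a b → Pre_subFrom a b → Spec_subFrom a b (subFrom a b)

-- ===== LEMMAS AND PROOFS =====

-- reference recursion for A's loop: emit the digit, push the borrow into the next digit now
def pvDec1 : List Int → List Int
  | [] => []
  | z :: t => (z - 1) :: t

def pvARec : List Int → List Int → List Int
  | a, [] => a
  | [], _ :: _ => []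
  | x :: a', y :: b' => if x < y then (x + 10 - y) :: pvARec (pvDec1 a') b' else (x - y) :: pvARec a' b'

-- reference recursion for B's fold: deferred borrow
def pvGo (br : Int) : List (Int × Int) → List Int
  | [] => []
  | (x, y) :: t => if x - y - br < 0 then (x - y - br + 10) :: pvGo 1 t else (x - y - br) :: pvGo 0 t

def pvApplyBorrow (br : Int) : List Int → List Int
  | [] => []
  | z :: t => (z - br) :: t

theorem pvDec1_length (q : List Int) : (pvDec1 q).length = q.length := by
  cases q <;> simp [pvDec1]

theorem pvApplyBorrow_zero (a : List Int) : pvApplyBorrow 0 a = a := by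
  cases a <;> simp [pvApplyBorrow]

theorem getD_append_len (p q : List Int) (x d : Int) :
    (p ++ x :: q).getD p.length d = x := by
  induction p with
  | nil => rfl
  | cons h t ih => simpa using ih

theorem getD_append_len_succ (p q : List Int) (x d : Int) :
    (p ++ x :: q).getD (p.length + 1) d = q.getD 0 d := by
  induction p with
  | nil => rfl
  | cons h t ih => simpa using ih

theorem set_append_len (p q : List Int) (x v : Int) :
    (p ++ x :: q).set p.length v = p ++ v :: q := by
  induction p with
  | nil => rfl
  | cons h t ih => simp [ih]

theorem set_append_len_succ (p q : List Int) (x v : Int) :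
    (p ++ x :: q).set (p.length + 1) v = p ++ x :: q.set 0 v := by
  induction p with
  | nil => rfl
  | cons h t ih => simp [ih]

theorem set_zero_dec (q : List Int) : q.set 0 (q.getD 0 0 - 1) = pvDec1 q := by
  cases q <;> rfl

theorem getD_of_drop (b : List Int) (n : Nat) (y : Int) (bs : List Int)
    (h : b.drop n = y :: bs) : b.getD n 0 = y := by
  have h0 : (b.drop n)[0]? = some y := by rw [h]; rfl
  rw [List.getElem?_drop] at h0
  simp only [Nat.add_zero] at h0
  simp [List.getD, h0]

-- A's loop, run from position p.length on p ++ q, equals p ++ pvARec q (b-suffix)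
theorem aloop_eq (bs : List Int) (b : List Int) : ∀ (p q : List Int),
    b.drop p.length = bs → b.length ≤ p.length + q.length →
    subFromLoop (p ++ q) b p.length = p ++ pvARec q bs := by
  induction bs with
  | nil =>
    intro p q hdrop _
    have hle : b.length ≤ p.length := by
      have := List.drop_eq_nil_iff.mp hdrop; omega
    rw [subFromLoop, if_neg (by omega)]
    simp [pvARec]
  | cons y bs' ih =>
    intro p q hdrop hlen
    have hlt : p.length < b.length := by
      by_contra h
      rw [List.drop_eq_nil_of_le (by omega)] at hdrop
      simp at hdrop
    match q with
    | [] => simp at hlen; omega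
    | x :: q' =>
      have hb : b.getD p.length 0 = y := getD_of_drop b p.length y bs' hdrop
      have hdrop' : b.drop (p.length + 1) = bs' := by
        rw [← List.drop_drop, hdrop]; rfl
      rw [subFromLoop, if_pos hlt]
      simp only [getD_append_len, hb]
      by_cases hxy : x < y
      · rw [if_pos hxy]
        rw [set_append_len, set_append_len_succ, getD_append_len_succ, set_zero_dec]
        have h1 : p ++ (x + 10 - y) :: pvDec1 q' = (p ++ [x + 10 - y]) ++ pvDec1 q' := by simp
        have h2 : p.length + 1 = (p ++ [x + 10 - y]).length := by simp
        rw [h1, h2, ih (p ++ [x + 10 - y]) (pvDec1 q') (by simpa using hdrop')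
            (by simp [pvDec1_length]; simp at hlen; omega)]
        simp [pvARec, if_pos hxy]
      · rw [if_neg hxy]
        rw [set_append_len]
        have h1 : p ++ (x - y) :: q' = (p ++ [x - y]) ++ q' := by simp
        have h2 : p.length + 1 = (p ++ [x - y]).length := by simp
        rw [h1, h2, ih (p ++ [x - y]) q' (by simpa using hdrop')
            (by simp; simp at hlen; omega)]
        simp [pvARec, if_neg hxy]

-- B's fold equals pvGo / pvBorrowEnd
theorem bfold_eq (ps : List (Int × Int)) : ∀ (out : List Int) (br : Int),
    ps.foldl
      (fun (st : List Int × Int) (xy : Int × Int) =>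
        let d := xy.1 - xy.2 - st.2
        if d < 0 then (st.1 ++ [d + 10], 1) else (st.1 ++ [d], 0))
      (out, br) = (out ++ pvGo br ps, pvBorrowEnd br ps) := by
  induction ps with
  | nil => intro out br; simp [pvGo, pvBorrowEnd]
  | cons xy t ih =>
    intro out br
    obtain ⟨x, y⟩ := xy
    have e1 : pvGo br ((x, y) :: t) = if x - y - br < 0 then (x - y - br + 10) :: pvGo 1 t else (x - y - br) :: pvGo 0 t := by
      simp only [pvGo]
    have e2 : pvBorrowEnd br ((x, y) :: t) = pvBorrowEnd (if x - y - br < 0 then 1 else 0) t := by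
      simp only [pvBorrowEnd]
    by_cases hd : x - y - br < 0
    · simp only [List.foldl_cons, if_pos hd]
      rw [ih, e1, e2, if_pos hd, if_pos hd]
      simp
    · simp only [List.foldl_cons, if_neg hd]
      rw [ih, e1, e2, if_neg hd, if_neg hd]
      simp

-- the bridge: A's eager per-digit borrow equals B's deferred borrow
theorem bridge (b : List Int) : ∀ (a : List Int) (br : Int),
    (br = 0 ∨ br = 1) → b.length ≤ a.length →
    (b.length < a.length ∨ pvBorrowEnd br (a.zip b) = 0) →
    pvARec (pvApplyBorrow br a) b =
      if pvBorrowEnd br (a.zip b) = 1 then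
        pvGo br (a.zip b) ++ (a.getD b.length 0 - 1) :: a.drop (b.length + 1)
      else pvGo br (a.zip b) ++ a.drop b.length := by
  induction b with
  | nil =>
    intro a br hbr _ hside
    simp only [List.zip_nil_right, pvBorrowEnd, pvGo]
    rcases hbr with h0 | h1
    · subst h0
      simp [pvARec, pvApplyBorrow_zero]
    · subst h1
      simp only [reduceIte]
      have ha : 0 < a.length := by
        rcases hside with h | h
        · simpa using h
        · simp [pvBorrowEnd] at h
      match a with
      | z :: t => simp [pvARec, pvApplyBorrow, List.getD]
  | cons y b' ih =>
    intro a br hbr hle hside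
    match a with
    | [] => simp at hle
    | x :: a' =>
      have ezip : (x :: a').zip (y :: b') = (x, y) :: a'.zip b' := rfl
      have e2 : pvBorrowEnd br ((x, y) :: a'.zip b') = pvBorrowEnd (if x - y - br < 0 then 1 else 0) (a'.zip b') := by
        simp only [pvBorrowEnd]
      simp only [List.zip_cons_cons, pvApplyBorrow, pvARec, pvBorrowEnd, pvGo]
      have hcond : (x - br < y) ↔ (x - y - br < 0) := by omega
      by_cases hd : x - y - br < 0
      · rw [if_pos (hcond.mpr hd), if_pos hd, if_pos hd]
        have hdec : pvDec1 a' = pvApplyBorrow 1 a' := by cases a' <;> rfl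
        rw [hdec, ih a' 1 (Or.inr rfl) (by simp at hle; omega)
            (by rcases hside with h | h
                · left; simp at h; omega
                · right; rw [ezip, e2, if_pos hd] at h; exact h)]
        have hx : x - br + 10 - y = x - y - br + 10 := by ring
        by_cases hfb : pvBorrowEnd 1 (a'.zip b') = 1
        · rw [if_pos hfb, if_pos hfb]
          simp [hx, List.getD]
        · rw [if_neg hfb, if_neg hfb]
          simp [hx]
      · rw [if_neg (fun h => hd (hcond.mp h)), if_neg hd, if_neg hd]
        rw [show a' = pvApplyBorrow 0 a' from (pvApplyBorrow_zero a').symm] -- rewrite back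
        rw [ih a' 0 (Or.inl rfl) (by simp at hle; omega)
            (by rcases hside with h | h
                · left; simp at h; omega
                · right; rw [ezip, e2, if_neg hd] at h; exact h)]
        rw [pvApplyBorrow_zero]
        have hx : x - br - y = x - y - br := by ring
        by_cases hfb : pvBorrowEnd 0 (a'.zip b') = 1
        · rw [if_pos hfb, if_pos hfb]
          simp [hx, List.getD]
        · rw [if_neg hfb, if_neg hfb]
          simp [hx]

theorem main_eq (a b : List Int) (hle : b.length ≤ a.length)
    (hside : b.length < a.length ∨ pvBorrowEnd 0 (a.zip b) = 0) :
    subFromLoop a b 0 = subFrom_alt a b := by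
  have hA : subFromLoop a b 0 = pvARec a b := by
    have := aloop_eq b b [] a (by simp) (by simpa using hle)
    simpa using this
  rw [subFrom_alt, if_neg (by omega)]
  simp only [bfold_eq]
  rw [hA, show pvARec a b = pvARec (pvApplyBorrow 0 a) b from by rw [pvApplyBorrow_zero]]
  rw [bridge b a 0 (Or.inl rfl) hle hside]
  by_cases hfb : pvBorrowEnd 0 (a.zip b) = 1
  · rw [if_pos hfb]
    simp [hfb]
  · rw [if_neg hfb]
    have : (pvBorrowEnd 0 (a.zip b) == 1) = false := by simpa using hfb
    simp [this]

-- ===== VERDICT (by name: the statement is the Claim_ definition above) =====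
theorem subFrom_spec : Claim_equal_subFrom := by
  intro a b _dom hpre
  unfold Spec_subFrom
  by_cases h : a.length < b.length
  · rw [subFrom, if_pos h, subFrom, if_neg (by omega), subFrom_alt, if_pos h]
    exact main_eq b a (le_of_lt h) (Or.inl h)
  · rw [subFrom, if_neg h]
    apply main_eq a b (by omega)
    by_cases heq : a.length = b.length
    · exact Or.inr (hpre heq)
    · left; omega
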